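-- pv_equiv track=rewrite | github.com/studiawan/pylogabstract | pylogabstract/misc/logsig.py | __get_asterisk
-- ===== SOURCE A (Python) =====
-- def __get_asterisk(candidate):
--     # candidate: list of list
--     abstraction = ''
--
--     # transpose row to column
--     candidate_transpose = list(zip(*candidate))
--     candidate_length = len(candidate)
--
--     if candidate_length > 1:
--         # get abstraction
--         abstraction_list = []
--         for index, message in enumerate(candidate_transpose):
--             message_length = len(set(message))
--             if message_length == 1:
--                 abstraction_list.append(message[0])
--             else:
--                 abstraction_list.append('*')
--
--         abstraction = ' '.join(abstraction_list)
--
--     elif candidate_length == 1: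
--         abstraction = ' '.join(candidate[0])
--
--     return abstraction
-- ===== SOURCE B (Python) =====
-- def __get_asterisk(candidate):
--     # row-major fold: maintain a running abstraction, starring columns on mismatch
--     if not candidate:
--         return ''
--     if len(candidate) == 1:
--         return ' '.join(candidate[0])
--     result = list(candidate[0])
--     for row in candidate[1:]:
--         result = [r if r == x else '*' for r, x in zip(result, row)]
--     return ' '.join(result)
-- ===== Notes on version B (the rewrite author's own statement) =====
-- stated objective: simpler
-- what changed: Replaces the transpose (zip(*candidate)) plus per-column set-cardinality test by a single row-major fold that keeps a running abstraction list and stars a position whenever a row disagrees with it.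
import Mathlib
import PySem

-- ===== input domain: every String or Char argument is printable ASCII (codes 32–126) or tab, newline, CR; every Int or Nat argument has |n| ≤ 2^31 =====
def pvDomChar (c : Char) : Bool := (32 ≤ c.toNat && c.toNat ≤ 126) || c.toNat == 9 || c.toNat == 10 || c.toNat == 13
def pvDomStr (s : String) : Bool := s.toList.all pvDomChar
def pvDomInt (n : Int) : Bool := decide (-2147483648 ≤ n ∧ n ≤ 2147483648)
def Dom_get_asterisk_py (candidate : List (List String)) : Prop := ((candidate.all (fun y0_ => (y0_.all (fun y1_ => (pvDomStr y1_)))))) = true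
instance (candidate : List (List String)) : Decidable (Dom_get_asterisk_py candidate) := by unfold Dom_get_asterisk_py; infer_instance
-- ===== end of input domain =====

-- B replaces A's transpose + per-column set-cardinality test by a single row-major fold that
-- maintains a running abstraction (objective: simpler decomposition, same cost).

-- ===== PORT A =====
-- zip(*candidate): collect the heads of all rows while every row is nonempty (zip truncation)
def pvZipStar : List (List String) → List (List String)
  | [] => []
  | r0 :: rs =>
      if h : (r0 :: rs).any List.isEmpty then []
      else ((r0 :: rs).map List.headI) :: pvZipStar (r0.tail :: rs.map List.tail)
  termination_by rows => (match rows with | [] => 0 | r :: _ => r.length)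
  decreasing_by
    have hr0 : r0 ≠ [] := by
      intro hnil
      exact h (by simp [hnil])
    cases r0 with
    | nil => exact absurd rfl hr0
    | cons a t => simp

-- literal port of A ('message[0]' on the always-nonempty column tuple is ported as headI)
def get_asterisk_py (candidate : List (List String)) : String :=
  let abstraction : String := ""
  let candidate_transpose := pvZipStar candidate
  let candidate_length := candidate.length
  if candidate_length > 1 then
    let abstraction_list := (PySem.List.enumerate candidate_transpose).foldl
      (fun acc im =>
        let message := im.2
        let message_length := (PySem.Set.ofList message).length
        if message_length = 1 then acc ++ [message.headI] else acc ++ ["*"])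
      ([] : List String)
    PySem.Str.join " " abstraction_list
  else if candidate_length = 1 then
    PySem.Str.join " " candidate.headI
  else abstraction

-- ===== PORT B =====
def get_asterisk_py_alt (candidate : List (List String)) : String :=
  match candidate with
  | [] => ""
  | [row] => PySem.Str.join " " row
  | r0 :: r1 :: rs =>
      let result := (r1 :: rs).foldl
        (fun res row => (res.zip row).map (fun p => if p.1 = p.2 then p.1 else "*")) r0
      PySem.Str.join " " result

-- ===== PRECONDITION & SPEC =====
def Spec_get_asterisk_py (candidate : List (List String)) (out : String) : Prop := out = get_asterisk_py_alt candidate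
instance (candidate : List (List String)) (out : String) : Decidable (Spec_get_asterisk_py candidate out) := by unfold Spec_get_asterisk_py; infer_instance

-- ===== CLAIM (what is proved, stated in full; the proofs are below) =====
def Claim_equal_get_asterisk_py : Prop := ∀ (candidate : List (List String)), Dom_get_asterisk_py candidate → Spec_get_asterisk_py candidate (get_asterisk_py candidate)

-- ===== LEMMAS AND PROOFS =====

-- minimum row length, in the accumulator shape of B's fold
def pvMinLen (r0 : List String) (rest : List (List String)) : Nat :=
  rest.foldl (fun m r => min m r.length) r0.length

-- one step of B's fold
def pvStep (res row : List String) : List String :=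
  (res.zip row).map (fun p => if p.1 = p.2 then p.1 else "*")

-- a single column of B's fold
def pvColFold (x : String) (ys : List String) : String :=
  ys.foldl (fun a y => if a = y then a else "*") x

lemma pvFoldMin_le_acc (rest : List (List String)) (a : Nat) :
    rest.foldl (fun m r => min m r.length) a ≤ a := by
  induction rest generalizing a with
  | nil => simp
  | cons r rs ih => exact le_trans (ih _) (Nat.min_le_left _ _)

lemma pvFoldMin_le_mem (rest : List (List String)) (a : Nat) (r : List String) (hr : r ∈ rest) :
    rest.foldl (fun m r => min m r.length) a ≤ r.length := by
  induction rest generalizing a with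
  | nil => simp at hr
  | cons s rs ih =>
      rcases List.mem_cons.mp hr with h | h
      · subst h; exact le_trans (pvFoldMin_le_acc rs _) (Nat.min_le_right _ _)
      · exact ih _ h

lemma pvFoldMin_pos (rest : List (List String)) (a : Nat) (ha : 0 < a)
    (h : ∀ r ∈ rest, 0 < r.length) :
    0 < rest.foldl (fun m r => min m r.length) a := by
  induction rest generalizing a with
  | nil => simpa using ha
  | cons r rs ih =>
      exact ih _ (lt_min ha (h r (by simp))) (fun s hs => h s (by simp [hs]))

lemma pvFoldMin_tail (rest : List (List String)) (a : Nat) :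
    rest.foldl (fun m r => min m (r.length - 1)) (a - 1)
      = rest.foldl (fun m r => min m r.length) a - 1 := by
  induction rest generalizing a with
  | nil => simp
  | cons r rs ih =>
      simp only [List.foldl_cons]
      rw [show min (a - 1) (r.length - 1) = min a r.length - 1 by omega]
      exact ih _

lemma pvMinLen_tail (r0 : List String) (rest : List (List String)) :
    pvMinLen r0.tail (rest.map List.tail) = pvMinLen r0 rest - 1 := by
  unfold pvMinLen
  rw [List.foldl_map]
  simpa [List.length_tail] using pvFoldMin_tail rest r0.length

lemma pvMinLen_eq_zero_of_any (r0 : List String) (rest : List (List String))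
    (h : (r0 :: rest).any List.isEmpty) : pvMinLen r0 rest = 0 := by
  simp only [List.any_eq_true, List.isEmpty_iff] at h
  rcases h with ⟨r, hr, hrnil⟩
  rcases List.mem_cons.mp hr with h' | h'
  · have h0 : r0.length = 0 := by rw [← h', hrnil]; rfl
    have := pvFoldMin_le_acc rest r0.length
    unfold pvMinLen; omega
  · have := pvFoldMin_le_mem rest r0.length r h'
    have h0 : r.length = 0 := by rw [hrnil]; rfl
    unfold pvMinLen; omega

lemma pvGetD_tail (r : List String) (i : Nat) :
    r.tail.getD i "" = r.getD (i + 1) "" := by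
  cases r <;> simp [List.getD]

lemma pvZipStar_len_aux (n : Nat) : ∀ (r0 : List String) (rest : List (List String)),
    r0.length ≤ n → (pvZipStar (r0 :: rest)).length = pvMinLen r0 rest := by
  induction n with
  | zero =>
      intro r0 rest h
      have hr0 : r0 = [] := List.length_eq_zero_iff.mp (Nat.le_zero.mp h)
      subst hr0
      rw [pvZipStar]
      rw [dif_pos (by simp)]
      rw [pvMinLen_eq_zero_of_any [] rest (by simp)]
      rfl
  | succ n ih =>
      intro r0 rest h
      rw [pvZipStar]
      by_cases he : (r0 :: rest).any List.isEmpty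
      · rw [dif_pos he, pvMinLen_eq_zero_of_any r0 rest he]; rfl
      · rw [dif_neg he]
        simp only [List.any_eq_true, List.isEmpty_iff, not_exists, not_and] at he
        have hr0 : r0 ≠ [] := fun hn => he r0 (by simp) hn
        have hpos : 0 < pvMinLen r0 rest := by
          apply pvFoldMin_pos
          · exact List.length_pos_iff.mpr hr0
          · intro r hr
            exact List.length_pos_iff.mpr (he r (by simp [hr]))
        have htail : r0.tail.length ≤ n := by
          have h3 : r0.tail.length = r0.length - 1 := List.length_tail
          omega
        have := ih r0.tail (rest.map List.tail) htail
        simp only [List.length_cons, this, pvMinLen_tail]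
        omega

lemma pvZipStar_len (r0 : List String) (rest : List (List String)) :
    (pvZipStar (r0 :: rest)).length = pvMinLen r0 rest :=
  pvZipStar_len_aux r0.length r0 rest le_rfl

lemma pvZipStar_get_aux (n : Nat) : ∀ (r0 : List String) (rest : List (List String)) (i : Nat),
    r0.length ≤ n → i < pvMinLen r0 rest →
    (pvZipStar (r0 :: rest)).getD i [] = (r0 :: rest).map (fun r => r.getD i "") := by
  induction n with
  | zero =>
      intro r0 rest i h hi
      have hr0 : r0 = [] := List.length_eq_zero_iff.mp (Nat.le_zero.mp h)
      subst hr0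
      rw [pvMinLen_eq_zero_of_any [] rest (by simp)] at hi
      omega
  | succ n ih =>
      intro r0 rest i h hi
      rw [pvZipStar]
      by_cases he : (r0 :: rest).any List.isEmpty
      · rw [pvMinLen_eq_zero_of_any r0 rest he] at hi; omega
      · rw [dif_neg he]
        simp only [List.any_eq_true, List.isEmpty_iff, not_exists, not_and] at he
        have hr0 : r0 ≠ [] := fun hn => he r0 (by simp) hn
        cases i with
        | zero =>
            simp only [List.getD_cons_zero]
            apply List.map_congr_left
            intro r hr
            have hrne : r ≠ [] := he r hr
            cases r with
            | nil => exact absurd rfl hrne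
            | cons a t => simp [List.headI, List.getD]
        | succ j =>
            have htail : r0.tail.length ≤ n := by
              have h3 : r0.tail.length = r0.length - 1 := List.length_tail
              omega
            have hlt : j < pvMinLen r0.tail (rest.map List.tail) := by
              rw [pvMinLen_tail]; omega
            have hrec := ih r0.tail (rest.map List.tail) j htail hlt
            simp only [List.getD_cons_succ, hrec, List.map_cons, List.map_map]
            refine congrArg₂ List.cons (pvGetD_tail r0 j) ?_
            exact List.map_congr_left (fun r _ => pvGetD_tail r j)

lemma pvZipStar_get (r0 : List String) (rest : List (List String)) (i : Nat)
    (hi : i < pvMinLen r0 rest) :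
    (pvZipStar (r0 :: rest)).getD i [] = (r0 :: rest).map (fun r => r.getD i "") :=
  pvZipStar_get_aux r0.length r0 rest i le_rfl hi

-- B's fold: length and per-column characterization
lemma pvStep_len (res row : List String) : (pvStep res row).length = min res.length row.length := by
  simp [pvStep]

lemma pvStep_get (res row : List String) (i : Nat) (hi : i < min res.length row.length) :
    (pvStep res row).getD i "" =
      if res.getD i "" = row.getD i "" then res.getD i "" else "*" := by
  have h1 : i < res.length := lt_of_lt_of_le hi (Nat.min_le_left _ _)
  have h2 : i < row.length := lt_of_lt_of_le hi (Nat.min_le_right _ _)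
  rw [List.getD_eq_getElem _ _ (by simp [pvStep]; omega)]
  rw [List.getD_eq_getElem _ _ h1, List.getD_eq_getElem _ _ h2]
  simp [pvStep]

lemma pvBfold_len (rest : List (List String)) : ∀ (r0 : List String),
    (rest.foldl pvStep r0).length = pvMinLen r0 rest := by
  induction rest with
  | nil => intro r0; rfl
  | cons r rs ih =>
      intro r0
      have : pvMinLen (pvStep r0 r) rs = pvMinLen r0 (r :: rs) := by
        unfold pvMinLen
        simp [pvStep_len]
      simp only [List.foldl_cons, ih, this]

lemma pvBfold_get (rest : List (List String)) : ∀ (r0 : List String) (i : Nat),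
    i < pvMinLen r0 rest →
    (rest.foldl pvStep r0).getD i "" =
      pvColFold (r0.getD i "") (rest.map (fun r => r.getD i "")) := by
  induction rest with
  | nil => intro r0 i _; rfl
  | cons r rs ih =>
      intro r0 i hi
      have hmin : pvMinLen (pvStep r0 r) rs = pvMinLen r0 (r :: rs) := by
        unfold pvMinLen
        simp [pvStep_len]
      have himin : i < min r0.length r.length := by
        have hle : pvMinLen r0 (r :: rs) ≤ min r0.length r.length := by
          unfold pvMinLen
          simpa using pvFoldMin_le_acc rs (min r0.length r.length)
        omega
      have hrec := ih (pvStep r0 r) i (by rw [hmin]; exact hi)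
      simp only [List.foldl_cons, hrec, pvStep_get r0 r i himin, List.map_cons]
      unfold pvColFold
      simp only [List.foldl_cons]

-- the running column fold computes 'first element if all equal, else *'
lemma pvColFold_eq (ys : List String) : ∀ (x : String),
    pvColFold x ys = if ∀ y ∈ ys, y = x then x else "*" := by
  induction ys with
  | nil => intro x; simp [pvColFold]
  | cons y ys ih =>
      intro x
      have hstep : pvColFold x (y :: ys) = pvColFold (if x = y then x else "*") ys := rfl
      by_cases hxy : x = y
      · rw [hstep, if_pos hxy, ih x]
        subst hxy
        simp
      · rw [hstep, if_neg hxy, ih "*"]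
        have hne : ¬ (∀ z ∈ y :: ys, z = x) := fun hall => hxy (hall y (by simp)).symm
        rw [if_neg hne]
        split <;> rfl

-- len(set(x :: ys)) == 1  ↔  every later element equals the first
lemma pvSetLen_one (x : String) (ys : List String) :
    (PySem.Set.ofList (x :: ys)).length = 1 ↔ ∀ y ∈ ys, y = x := by
  constructor
  · intro h
    rcases List.length_eq_one_iff.mp h with ⟨a, ha⟩
    have hx : x = a := by
      have : x ∈ PySem.Set.ofList (x :: ys) := by
        rw [PySem.Set.mem_ofList]; simp
      rw [ha] at this; simpa using this
    intro y hy
    have : y ∈ PySem.Set.ofList (x :: ys) := by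
      rw [PySem.Set.mem_ofList]; simp [hy]
    rw [ha] at this
    simp at this
    rw [this, hx]
  · intro hall
    have hnd : (PySem.Set.ofList (x :: ys)).Nodup := PySem.Set.nodup_ofList _
    have hmem : ∀ z, z ∈ PySem.Set.ofList (x :: ys) ↔ z = x := by
      intro z
      rw [PySem.Set.mem_ofList]
      constructor
      · intro hz
        rcases List.mem_cons.mp hz with h | h
        · exact h
        · exact hall z h
      · intro hz; simp [hz]
    cases hl : PySem.Set.ofList (x :: ys) with
    | nil =>
        exfalso
        have : x ∈ PySem.Set.ofList (x :: ys) := (hmem x).mpr rfl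
        rw [hl] at this; simp at this
    | cons a t =>
        have ha : a = x := by
          have : a ∈ PySem.Set.ofList (x :: ys) := by rw [hl]; simp
          exact (hmem a).mp this
        have ht : t = [] := by
          rw [List.eq_nil_iff_forall_not_mem]
          intro z hz
          have hzx : z = x := by
            have : z ∈ PySem.Set.ofList (x :: ys) := by rw [hl]; simp [hz]
            exact (hmem z).mp this
          rw [hl] at hnd
          rw [List.nodup_cons] at hnd
          exact hnd.1 (by rw [ha, ← hzx]; exact hz)
        rw [ht]
        rfl

-- the two abstraction lists coincide in the multi-row case
lemma pvLists_eq (r0 r1 : List String) (rs : List (List String)) :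
    (pvZipStar (r0 :: r1 :: rs)).map
        (fun message => if (PySem.Set.ofList message).length = 1 then message.headI else "*")
      = (r1 :: rs).foldl pvStep r0 := by
  apply List.ext_getElem
  · rw [List.length_map, pvZipStar_len, pvBfold_len]
  · intro i h1 h2
    rw [List.length_map, pvZipStar_len] at h1
    have hz : (pvZipStar (r0 :: r1 :: rs)).getD i [] = (r0 :: r1 :: rs).map (fun r => r.getD i "") :=
      pvZipStar_get _ _ _ h1
    have hzl : i < (pvZipStar (r0 :: r1 :: rs)).length := by rw [pvZipStar_len]; exact h1
    have hb : ((r1 :: rs).foldl pvStep r0).getD i "" =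
        pvColFold (r0.getD i "") ((r1 :: rs).map (fun r => r.getD i "")) :=
      pvBfold_get _ _ _ h1
    rw [List.getD_eq_getElem _ _ hzl] at hz
    rw [List.getD_eq_getElem _ _ h2] at hb
    rw [List.getElem_map]
    rw [hz, hb, pvColFold_eq]
    simp only [List.map_cons, List.headI_cons]
    by_cases hc : ∀ y ∈ r1.getD i "" :: rs.map (fun r => r.getD i ""), y = r0.getD i ""
    · rw [if_pos ((pvSetLen_one _ _).mpr hc), if_pos hc]
    · rw [if_neg (fun h => hc ((pvSetLen_one _ _).mp h)), if_neg hc]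

-- ===== VERDICT (by name: the statement is the Claim_ definition above) =====
theorem get_asterisk_py_spec : Claim_equal_get_asterisk_py := by
  intro candidate _
  unfold Spec_get_asterisk_py
  match candidate with
  | [] => rfl
  | [row] => rfl
  | r0 :: r1 :: rs =>
      show get_asterisk_py (r0 :: r1 :: rs) = get_asterisk_py_alt (r0 :: r1 :: rs)
      unfold get_asterisk_py get_asterisk_py_alt
      simp only [List.length_cons]
      rw [if_pos (by omega)]
      congr 1
      have hbody : (fun (acc : List String) (im : Int × List String) =>
            if (PySem.Set.ofList im.2).length = 1 then acc ++ [im.2.headI] else acc ++ ["*"])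
          = fun acc im =>
            acc ++ [if (PySem.Set.ofList im.2).length = 1 then im.2.headI else "*"] := by
        funext acc im; split <;> rfl
      rw [hbody, PySem.List.foldl_append_singleton_eq_map, List.nil_append]
      have hsnd : (PySem.List.enumerate (pvZipStar (r0 :: r1 :: rs))).map Prod.snd
          = pvZipStar (r0 :: r1 :: rs) := PySem.List.map_snd_enumerate _ _
      calc ((PySem.List.enumerate (pvZipStar (r0 :: r1 :: rs))).map
              (fun im => if (PySem.Set.ofList im.2).length = 1 then im.2.headI else "*"))
          = ((PySem.List.enumerate (pvZipStar (r0 :: r1 :: rs))).map Prod.snd).map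
              (fun message =>
                if (PySem.Set.ofList message).length = 1 then message.headI else "*") := by
            rw [List.map_map]; rfl
        _ = _ := by rw [hsnd, pvLists_eq]; rfl
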